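-- pv_equiv track=rewrite | github.com/HabanaAI/gaudi-pytorch-bridge | scripts/gen_op.py | extract_reduction_vars_indices
-- ===== SOURCE A (Python) =====
-- def extract_reduction_vars_indices(param_vars, use_int=False):
--     default_id = "-1" if use_int else "c10::nullopt"
--     reduction_vars_indices = [default_id] * 3
--
--     for i, var in enumerate(param_vars):
--         i = str(i)
--         if var == "dim":
--             reduction_vars_indices[0] = i
--         elif var == "keepdim":
--             reduction_vars_indices[1] = i
--         elif var == "dtype":
--             reduction_vars_indices[2] = i
--
--     return reduction_vars_indices
-- ===== SOURCE B (Python) =====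
-- def extract_reduction_vars_indices(param_vars, use_int=False):
--     default = "-1" if use_int else "c10::nullopt"
--     rev = list(reversed(param_vars))
--     n = len(param_vars)
--     result = []
--     for name in ("dim", "keepdim", "dtype"):
--         try:
--             result.append(str(n - 1 - rev.index(name)))
--         except ValueError:
--             result.append(default)
--     return result
-- ===== Notes on version B (the rewrite author's own statement) =====
-- stated objective: alternative
-- what changed: B replaces A's single forward scan that mutates a preallocated 3-slot list via an if/elif chain by iterating over the three target names and, for each, finding its last occurrence with one reversed-list index() search (n-1-rev.index(name)), falling back to the default on ValueError.
import Mathlib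
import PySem

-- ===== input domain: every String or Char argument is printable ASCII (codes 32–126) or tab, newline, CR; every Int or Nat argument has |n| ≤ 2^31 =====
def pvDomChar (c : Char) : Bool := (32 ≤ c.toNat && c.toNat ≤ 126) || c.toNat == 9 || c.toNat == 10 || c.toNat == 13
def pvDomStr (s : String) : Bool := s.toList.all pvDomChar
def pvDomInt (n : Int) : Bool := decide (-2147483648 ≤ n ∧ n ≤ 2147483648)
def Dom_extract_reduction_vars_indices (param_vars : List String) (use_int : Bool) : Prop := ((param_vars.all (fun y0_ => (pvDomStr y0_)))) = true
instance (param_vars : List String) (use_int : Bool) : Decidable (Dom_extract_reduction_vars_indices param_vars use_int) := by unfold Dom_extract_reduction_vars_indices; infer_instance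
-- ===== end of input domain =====

-- B replaces A's forward scan mutating a 3-slot list by three reversed-list index() searches, one per target name; alternative structure, same cost.

-- ===== PORT A =====
-- A scans enumerate(param_vars), overwriting slots 0/1/2 of a preallocated 3-list via if/elif.
def extract_reduction_vars_indices (param_vars : List String) (use_int : Bool) : List String :=
  let default_id := if use_int then "-1" else "c10::nullopt"
  (PySem.List.enumerate param_vars).foldl
    (fun acc p =>
      let i := PySem.Int.toStr p.1
      if p.2 == "dim" then acc.set 0 i
      else if p.2 == "keepdim" then acc.set 1 i
      else if p.2 == "dtype" then acc.set 2 i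
      else acc)
    [default_id, default_id, default_id]

-- ===== PORT B =====
-- B: rev = reversed(param_vars); for each of the three names append str(n-1-rev.index(name)),
-- or the default when index() raises ValueError (index? = none).
def extract_reduction_vars_indices_alt (param_vars : List String) (use_int : Bool) : List String :=
  let default := if use_int then "-1" else "c10::nullopt"
  let rev := param_vars.reverse
  let n : Int := param_vars.length
  (["dim", "keepdim", "dtype"]).foldl
    (fun result name =>
      match PySem.List.index? rev name with
      | some k => result ++ [PySem.Int.toStr (n - 1 - (k : Int))]
      | none => result ++ [default])
    []

-- ===== PRECONDITION & SPEC =====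
def Spec_extract_reduction_vars_indices (param_vars : List String) (use_int : Bool) (out : List String) : Prop := out = extract_reduction_vars_indices_alt param_vars use_int
instance (param_vars : List String) (use_int : Bool) (out : List String) : Decidable (Spec_extract_reduction_vars_indices param_vars use_int out) := by unfold Spec_extract_reduction_vars_indices; infer_instance

-- ===== CLAIM (what is proved, stated in full; the proofs are below) =====
def Claim_equal_extract_reduction_vars_indices : Prop := ∀ (param_vars : List String) (use_int : Bool), Dom_extract_reduction_vars_indices param_vars use_int → Spec_extract_reduction_vars_indices param_vars use_int (extract_reduction_vars_indices param_vars use_int)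

-- ===== LEMMAS AND PROOFS =====

-- the value B produces for one name: last occurrence via reversed index?, else the default
def pvH (xs : List String) (name d : String) : String :=
  match PySem.List.index? xs.reverse name with
  | some k => PySem.Int.toStr ((xs.length : Int) - 1 - (k : Int))
  | none => d

theorem pv_enum_append (xs : List String) (x : String) (s : Int) :
    PySem.List.enumerate (xs ++ [x]) s
      = PySem.List.enumerate xs s ++ [(s + xs.length, x)] := by
  induction xs generalizing s with
  | nil => simp [PySem.List.enumerate_cons, PySem.List.enumerate_nil]
  | cons y ys ih =>
    simp [PySem.List.enumerate_cons, ih (s + 1)]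
    ring_nf

-- invariance of the per-name value under appending a non-matching element
theorem pvH_append_ne (ys : List String) (x name d : String) (h : x ≠ name) :
    pvH (ys ++ [x]) name d = pvH ys name d := by
  unfold pvH
  rw [show (ys ++ [x]).reverse = x :: ys.reverse by simp,
      PySem.List.index?_cons_of_ne ys.reverse h]
  cases PySem.List.index? ys.reverse name with
  | none => rfl
  | some k =>
    simp only [Option.map_some, List.length_append, List.length_cons, List.length_nil]
    congr 1
    push_cast
    ring

-- appending the name itself makes it the last occurrence
theorem pvH_append_self (ys : List String) (x d : String) :
    pvH (ys ++ [x]) x d = PySem.Int.toStr (ys.length : Int) := by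
  unfold pvH
  rw [show (ys ++ [x]).reverse = x :: ys.reverse by simp,
      PySem.List.index?_cons_self]
  simp only [List.length_append, List.length_cons, List.length_nil]
  congr 1
  push_cast
  ring

-- Invariant: A's fold over enumerate(xs) from [a,b,c] yields B's three per-name values.
theorem pv_loop (xs : List String) (a b c : String) :
    (PySem.List.enumerate xs).foldl
      (fun acc p =>
        let i := PySem.Int.toStr p.1
        if p.2 == "dim" then acc.set 0 i
        else if p.2 == "keepdim" then acc.set 1 i
        else if p.2 == "dtype" then acc.set 2 i
        else acc)
      [a, b, c]
    = [pvH xs "dim" a, pvH xs "keepdim" b, pvH xs "dtype" c] := by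
  induction xs using List.reverseRecOn with
  | nil => simp [PySem.List.enumerate_nil, pvH, PySem.List.index?]
  | append_singleton ys x ih =>
    rw [pv_enum_append ys x 0, List.foldl_append, ih]
    simp only [List.foldl_cons, List.foldl_nil, zero_add]
    by_cases h1 : x = "dim"
    · subst h1
      simp [pvH_append_self, pvH_append_ne ys _ _ _ (by decide : "dim" ≠ "keepdim"),
        pvH_append_ne ys _ _ _ (by decide : "dim" ≠ "dtype")]
    · by_cases h2 : x = "keepdim"
      · subst h2
        simp [pvH_append_self, pvH_append_ne ys _ _ _ (by decide : "keepdim" ≠ "dim"),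
          pvH_append_ne ys _ _ _ (by decide : "keepdim" ≠ "dtype")]
      · by_cases h3 : x = "dtype"
        · subst h3
          simp [pvH_append_self, pvH_append_ne ys _ _ _ (by decide : "dtype" ≠ "dim"),
            pvH_append_ne ys _ _ _ (by decide : "dtype" ≠ "keepdim")]
        · simp only [show (x == "dim") = false by simp [h1],
            show (x == "keepdim") = false by simp [h2],
            show (x == "dtype") = false by simp [h3], Bool.false_eq_true, if_false]
          simp [pvH_append_ne ys _ _ _ h1, pvH_append_ne ys _ _ _ h2, pvH_append_ne ys _ _ _ h3]

-- B's fold over the three literal names, expressed through pvH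
theorem pv_alt_eq (param_vars : List String) (use_int : Bool) :
    extract_reduction_vars_indices_alt param_vars use_int
      = [pvH param_vars "dim" (if use_int then "-1" else "c10::nullopt"),
         pvH param_vars "keepdim" (if use_int then "-1" else "c10::nullopt"),
         pvH param_vars "dtype" (if use_int then "-1" else "c10::nullopt")] := by
  unfold extract_reduction_vars_indices_alt
  simp only [List.foldl_cons, List.foldl_nil]
  cases h1 : PySem.List.index? param_vars.reverse "dim" <;>
  cases h2 : PySem.List.index? param_vars.reverse "keepdim" <;>
  cases h3 : PySem.List.index? param_vars.reverse "dtype" <;>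
  simp only [pvH, h1, h2, h3, List.nil_append, List.cons_append]

-- ===== VERDICT (by name: the statement is the Claim_ definition above) =====
theorem extract_reduction_vars_indices_spec : Claim_equal_extract_reduction_vars_indices := by
  intro param_vars use_int _
  show _ = _
  rw [pv_alt_eq]
  unfold extract_reduction_vars_indices
  exact pv_loop param_vars _ _ _
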